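-- pv_equiv track=rewrite | github.com/2200010139/Seqlogo | rh.py | validate_alignment
-- ===== SOURCE A (Python) =====
-- def validate_alignment(seqs):
--     """Check all sequences have the same length."""
--     if not seqs:
--         raise ValueError("No sequences provided")
--     L = len(seqs[0])
--     for s in seqs:
--         if len(s) != L:
--             raise ValueError("Sequences are not aligned: differing lengths found")
--     return L
-- ===== SOURCE B (Python) =====
-- def validate_alignment(seqs):
--     """Check all sequences have the same length."""
--     if not seqs:
--         raise ValueError("No sequences provided")
--     lengths = [len(s) for s in seqs]
--     mn, mx = min(lengths), max(lengths)
--     if mn != mx: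
--         raise ValueError("Sequences are not aligned: differing lengths found")
--     return mn
-- ===== Notes on version B (the rewrite author's own statement) =====
-- stated objective: alternative
-- what changed: Replaces A's per-element early-exit comparison against the first length by two aggregate reductions: min and max of the length list; all lengths are equal iff the extremes coincide, and the common length is returned as that minimum.
import Mathlib
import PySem

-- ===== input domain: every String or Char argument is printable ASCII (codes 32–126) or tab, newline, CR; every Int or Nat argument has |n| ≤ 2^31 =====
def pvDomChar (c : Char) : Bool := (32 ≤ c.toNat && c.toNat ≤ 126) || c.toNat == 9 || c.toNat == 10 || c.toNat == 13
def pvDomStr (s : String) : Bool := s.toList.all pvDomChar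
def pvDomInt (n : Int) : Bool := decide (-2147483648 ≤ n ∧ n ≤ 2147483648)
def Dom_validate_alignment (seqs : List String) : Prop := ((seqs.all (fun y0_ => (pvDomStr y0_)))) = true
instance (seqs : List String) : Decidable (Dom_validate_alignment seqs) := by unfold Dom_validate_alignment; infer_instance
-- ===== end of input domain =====

-- B checks alignment via aggregate min/max of the length list (extremes coincide ⇔ all equal)
-- instead of A's per-element early-exit scan against the first length; same cost, alternative algorithm.


-- ===== PORT A =====
-- raise → sentinel 0; those inputs are excluded by Pre_validate_alignment
def validate_alignment (seqs : List String) : Int :=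
  match seqs with
  | [] => 0
  | s0 :: _ =>
    let L := PySem.Str.len s0
    if seqs.all (fun s => PySem.Str.len s == L) then L else 0

-- ===== PORT B =====
-- raise → sentinel 0
def validate_alignment_alt (seqs : List String) : Int :=
  if seqs.isEmpty then 0
  else
    let lengths := seqs.map PySem.Str.len
    match PySem.List.min? lengths (fun x => x), PySem.List.max? lengths (fun x => x) with
    | some mn, some mx => if mn ≠ mx then 0 else mn
    | _, _ => 0

-- ===== PRECONDITION & SPEC =====
-- Pre_ excludes exactly the inputs where A raises ValueError: the empty list and lists with differing lengths.
def Pre_validate_alignment (seqs : List String) : Prop :=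
  seqs ≠ [] ∧ ∀ s ∈ seqs, PySem.Str.len s = PySem.Str.len (seqs.headD "")
instance (seqs : List String) : Decidable (Pre_validate_alignment seqs) := by unfold Pre_validate_alignment; infer_instance
def pvWitness_validate_alignment : List String := ["ACGT", "TGCA"]

def Spec_validate_alignment (seqs : List String) (out : Int) : Prop := out = validate_alignment_alt seqs
instance (seqs : List String) (out : Int) : Decidable (Spec_validate_alignment seqs out) := by unfold Spec_validate_alignment; infer_instance

-- ===== CLAIM (what is proved, stated in full; the proofs are below) =====
def Claim_equal_validate_alignment : Prop := ∀ (seqs : List String), Dom_validate_alignment seqs → Pre_validate_alignment seqs → Spec_validate_alignment seqs (validate_alignment seqs)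

-- ===== LEMMAS AND PROOFS =====

-- min of a nonempty constant list is its constant (for the identity key)
lemma min?_const (c : Int) (t : List Int) (h : ∀ x ∈ t, x = c) :
    PySem.List.min? (c :: t) (fun x => x) = some c := by
  rw [PySem.List.min?_id_cons]
  congr 1
  induction t with
  | nil => rfl
  | cons b t' ih =>
    have hb : b = c := h b (by simp)
    subst hb
    simp only [List.foldl_cons, min_self]
    exact ih (fun x hx => h x (by simp [hx]))

-- max of a nonempty constant list is its constant (for the identity key)
lemma max?_const (c : Int) (t : List Int) (h : ∀ x ∈ t, x = c) :
    PySem.List.max? (c :: t) (fun x => x) = some c := by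
  rw [PySem.List.max?_id_cons]
  congr 1
  induction t with
  | nil => rfl
  | cons b t' ih =>
    have hb : b = c := h b (by simp)
    subst hb
    simp only [List.foldl_cons, max_self]
    exact ih (fun x hx => h x (by simp [hx]))

-- ===== VERDICT (by name: the statement is the Claim_ definition above) =====
theorem validate_alignment_spec : Claim_equal_validate_alignment := by
  intro seqs _ hpre
  obtain ⟨hne, hall⟩ := hpre
  match seqs with
  | [] => exact absurd rfl hne
  | s0 :: rest =>
    have hall' : ∀ s ∈ s0 :: rest, PySem.Str.len s = PySem.Str.len s0 := by
      simpa using hall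
    unfold Spec_validate_alignment validate_alignment validate_alignment_alt
    have hconst : ∀ x ∈ rest.map PySem.Str.len, x = PySem.Str.len s0 := by
      intro x hx
      obtain ⟨s, hs, rfl⟩ := List.mem_map.mp hx
      exact hall' s (by simp [hs])
    have hA : (s0 :: rest).all (fun s => PySem.Str.len s == PySem.Str.len s0) = true := by
      rw [List.all_eq_true]; intro s hs; exact beq_iff_eq.mpr (hall' s hs)
    simp only [List.isEmpty_cons, List.map_cons, min?_const _ _ hconst, max?_const _ _ hconst, hA]
    simp
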